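-- pv_equiv track=rewrite | github.com/JohnLyu2/smt-select | src/run_all_eval.py | parse_model_dir
-- ===== SOURCE A (Python) =====
-- def parse_model_dir(dir_name: str, known_logics):
--     # strip training artefact
--     if dir_name.endswith("_model.joblib"):
--         base = dir_name.removesuffix("_model.joblib")
--     else:
--         base = dir_name
--
--     # longest-prefix match
--     for logic in sorted(known_logics, key=len, reverse=True):
--         if base.startswith(logic):
--             rest = base[len(logic):].lstrip("_").lower()
--
--             if "feature" in rest and "embedding" in rest:
--                 source = "features_embeddings"
--             elif "feature" in rest:
--                 source = "features"
--             elif "combined" in rest: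
--                 source = "embeddings_combined"
--             elif "embedding" in rest:
--                 source = "embeddings"
--             else:
--                 raise ValueError(f"Cannot infer feature source from: {dir_name}")
--
--             return logic, source
--
--     raise ValueError(f"No matching logic for model dir: {dir_name}")
--
--     return logic, source
-- ===== SOURCE B (Python) =====
-- def parse_model_dir(dir_name: str, known_logics):
--     # strip training artefact
--     base = dir_name[:-len("_model.joblib")] if dir_name.endswith("_model.joblib") else dir_name
--
--     # longest-prefix match driven by base: walk prefix lengths downward with a set lookup
--     logic_set = set(known_logics)
--     logic = None
--     for k in range(len(base), -1, -1):
--         if base[:k] in logic_set: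
--             logic = base[:k]
--             break
--     if logic is None:
--         raise ValueError(f"No matching logic for model dir: {dir_name}")
--
--     rest = base[len(logic):].lstrip("_").lower()
--     if "feature" in rest and "embedding" in rest:
--         source = "features_embeddings"
--     elif "feature" in rest:
--         source = "features"
--     elif "combined" in rest:
--         source = "embeddings_combined"
--     elif "embedding" in rest:
--         source = "embeddings"
--     else:
--         raise ValueError(f"Cannot infer feature source from: {dir_name}")
--     return logic, source
-- ===== Notes on version B (the rewrite author's own statement) =====
-- stated objective: alternative
-- what changed: Instead of iterating over the logic list (sorted by length) and testing startswith, B iterates over the prefix lengths of base downward and probes each prefix base[:k] against a hash set of the known logics, so the longest matching prefix is found by set lookup rather than by scanning/sorting the list; both ValueError messages are kept.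
import Mathlib
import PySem

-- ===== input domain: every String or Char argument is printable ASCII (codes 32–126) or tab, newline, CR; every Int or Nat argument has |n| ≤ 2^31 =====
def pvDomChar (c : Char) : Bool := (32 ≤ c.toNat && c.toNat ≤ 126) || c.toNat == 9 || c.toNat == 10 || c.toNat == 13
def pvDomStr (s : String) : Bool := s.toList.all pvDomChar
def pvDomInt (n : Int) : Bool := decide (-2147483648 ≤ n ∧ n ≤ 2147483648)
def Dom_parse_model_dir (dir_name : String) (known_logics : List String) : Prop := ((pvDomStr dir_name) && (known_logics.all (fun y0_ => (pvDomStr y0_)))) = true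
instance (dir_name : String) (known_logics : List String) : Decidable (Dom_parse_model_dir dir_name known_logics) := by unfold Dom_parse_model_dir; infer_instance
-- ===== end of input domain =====

-- B replaces A's sort-by-length-descending scan over the logic list by a loop over the prefix
-- lengths of base, probing each prefix against a set of the known logics: an alternative algorithm.


-- shared small helpers (used by both ports and by Pre_; not a port themselves)
-- dir_name.removesuffix("_model.joblib") after the endswith check: drop the last 13 chars (exact)
def pvBase (dir_name : String) : String :=
  if PySem.Str.endswith dir_name "_model.joblib"
  then String.ofList (dir_name.toList.take (dir_name.toList.length - 13))
  else dir_name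

-- rest = base[len(logic):].lstrip("_").lower()   (lstrip("_") = dropWhile (· = '_'); exact)
def pvRest (base logic : String) : String :=
  PySem.Str.lower (String.ofList ((base.toList.drop logic.toList.length).dropWhile (fun c => c == '_')))

-- ===== PORT A =====
-- A's loop over sorted(known_logics, key=len, reverse=True); the two raise branches return ("","")
-- (those inputs are excluded by Pre_).
def pvALoop (base : String) : List String → String × String
  | [] => ("", "")  -- raise ValueError(no matching logic): outside Pre_
  | logic :: tl =>
    if PySem.Str.startswith base logic then
      let rest := pvRest base logic
      if PySem.Str.isIn "feature" rest && PySem.Str.isIn "embedding" rest then (logic, "features_embeddings")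
      else if PySem.Str.isIn "feature" rest then (logic, "features")
      else if PySem.Str.isIn "combined" rest then (logic, "embeddings_combined")
      else if PySem.Str.isIn "embedding" rest then (logic, "embeddings")
      else ("", "")  -- raise ValueError(cannot infer source): outside Pre_
    else pvALoop base tl

def parse_model_dir (dir_name : String) (known_logics : List String) : String × String :=
  pvALoop (pvBase dir_name) (PySem.List.sorted known_logics (fun s => s.toList.length) true)

-- ===== PORT B =====
-- for k in range(len(base), -1, -1): if base[:k] in logic_set: break  — downward loop on k
def pvBLoop (base : String) (s : PySem.Set String) : Nat → Option String
  | 0 =>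
    if PySem.Set.contains s (String.ofList (base.toList.take 0))
    then some (String.ofList (base.toList.take 0)) else none
  | k+1 =>
    if PySem.Set.contains s (String.ofList (base.toList.take (k+1)))
    then some (String.ofList (base.toList.take (k+1)))
    else pvBLoop base s k

def parse_model_dir_alt (dir_name : String) (known_logics : List String) : String × String :=
  let base := pvBase dir_name
  let logic_set : PySem.Set String := PySem.Set.ofList known_logics
  match pvBLoop base logic_set base.toList.length with
  | none => ("", "")  -- raise ValueError(no matching logic): outside Pre_
  | some logic =>
    let rest := pvRest base logic
    if PySem.Str.isIn "feature" rest && PySem.Str.isIn "embedding" rest then (logic, "features_embeddings")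
    else if PySem.Str.isIn "feature" rest then (logic, "features")
    else if PySem.Str.isIn "combined" rest then (logic, "embeddings_combined")
    else if PySem.Str.isIn "embedding" rest then (logic, "embeddings")
    else ("", "")  -- raise ValueError(cannot infer source): outside Pre_

-- ===== PRECONDITION & SPEC =====
-- A raises ValueError when no known logic is a prefix of base, or when the rest after the
-- longest matching logic contains none of "feature"/"combined"/"embedding"; Pre_ excludes exactly those.
def Pre_parse_model_dir (dir_name : String) (known_logics : List String) : Prop :=
  ∃ l ∈ known_logics, PySem.Str.startswith (pvBase dir_name) l = true ∧
    (∀ l' ∈ known_logics, PySem.Str.startswith (pvBase dir_name) l' = true →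
        l'.toList.length ≤ l.toList.length) ∧
    (PySem.Str.isIn "feature" (pvRest (pvBase dir_name) l)
      || PySem.Str.isIn "combined" (pvRest (pvBase dir_name) l)
      || PySem.Str.isIn "embedding" (pvRest (pvBase dir_name) l)) = true

instance (dir_name : String) (known_logics : List String) : Decidable (Pre_parse_model_dir dir_name known_logics) := by unfold Pre_parse_model_dir; infer_instance

def pvWitness_parse_model_dir : String × List String := ("QF_LIA_features_model.joblib", ["QF", "QF_LIA"])

def Spec_parse_model_dir (dir_name : String) (known_logics : List String) (out : String × String) : Prop := out = parse_model_dir_alt dir_name known_logics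
instance (dir_name : String) (known_logics : List String) (out : String × String) : Decidable (Spec_parse_model_dir dir_name known_logics out) := by unfold Spec_parse_model_dir; infer_instance

-- ===== CLAIM (what is proved, stated in full; the proofs are below) =====
def Claim_equal_parse_model_dir : Prop := ∀ (dir_name : String) (known_logics : List String), Dom_parse_model_dir dir_name known_logics → Pre_parse_model_dir dir_name known_logics → Spec_parse_model_dir dir_name known_logics (parse_model_dir dir_name known_logics)

-- ===== LEMMAS AND PROOFS =====

-- two prefixes of the same string with equal length are the same string
theorem pv_prefix_unique {base l₁ l₂ : String}
    (h₁ : PySem.Str.startswith base l₁ = true) (h₂ : PySem.Str.startswith base l₂ = true)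
    (hlen : l₁.toList.length = l₂.toList.length) : l₁ = l₂ := by
  have p₁ : l₁.toList <+: base.toList := by
    have := h₁; simp [PySem.Str.startswith] at this
    exact (PySem.Chars.startswith_iff _ _).mp this
  have p₂ : l₂.toList <+: base.toList := by
    have := h₂; simp [PySem.Str.startswith] at this
    exact (PySem.Chars.startswith_iff _ _).mp this
  have : l₁.toList = l₂.toList := by
    obtain ⟨t₁, e₁⟩ := p₁; obtain ⟨t₂, e₂⟩ := p₂
    have := e₁.trans e₂.symm
    exact List.append_inj_left this hlen
  have h := congrArg String.ofList this
  simpa using h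

-- shared classification of (logic, rest)
def pvClassify (base logic : String) : String × String :=
  let rest := pvRest base logic
  if PySem.Str.isIn "feature" rest && PySem.Str.isIn "embedding" rest then (logic, "features_embeddings")
  else if PySem.Str.isIn "feature" rest then (logic, "features")
  else if PySem.Str.isIn "combined" rest then (logic, "embeddings_combined")
  else if PySem.Str.isIn "embedding" rest then (logic, "embeddings")
  else (logic, "")

-- the shared if/elif chain with the raise branch replaced by a default agrees with pvClassify
-- whenever one of the three substrings is present
theorem pv_chain (f c e : Bool) (l : String) (h : (f || c || e) = true) :
    (if f && e then (l, "features_embeddings")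
     else if f then (l, "features")
     else if c then (l, "embeddings_combined")
     else if e then (l, "embeddings")
     else (("" : String), ("" : String))) =
    (if f && e then (l, "features_embeddings")
     else if f then (l, "features")
     else if c then (l, "embeddings_combined")
     else if e then (l, "embeddings")
     else (l, ("" : String))) := by
  cases f <;> cases c <;> cases e <;> simp_all

-- A's loop returns pvClassify at the max-length matching logic l, provided rest classifies
theorem pvALoop_eq (base l : String) (ys : List String)
    (hdesc : ys.Pairwise (fun a b => b.toList.length ≤ a.toList.length))
    (hmem : l ∈ ys) (hl : PySem.Str.startswith base l = true)
    (hmax : ∀ y ∈ ys, PySem.Str.startswith base y = true → y.toList.length ≤ l.toList.length)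
    (hcls : (PySem.Str.isIn "feature" (pvRest base l) || PySem.Str.isIn "combined" (pvRest base l)
      || PySem.Str.isIn "embedding" (pvRest base l)) = true) :
    pvALoop base ys = pvClassify base l := by
  induction ys with
  | nil => cases hmem
  | cons y t ih =>
    by_cases hy : PySem.Str.startswith base y = true
    · have hyl : y = l := by
        apply pv_prefix_unique hy hl
        have h1 : y.toList.length ≤ l.toList.length := hmax y (List.mem_cons_self) hy
        rcases List.mem_cons.mp hmem with h | h
        · rw [h]
        · have h2 : l.toList.length ≤ y.toList.length := (List.pairwise_cons.mp hdesc).1 l h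
          omega
      subst hyl
      simp only [pvALoop, hy, if_pos]
      exact pv_chain _ _ _ y hcls
    · have hly : l ≠ y := fun h => hy (h ▸ hl)
      have hmem' : l ∈ t := by
        rcases List.mem_cons.mp hmem with h | h
        · exact absurd h hly
        · exact h
      simp only [pvALoop, hy]
      simp only [Bool.not_eq_true] at hy
      rw [if_neg (by simp)]
      exact ih (List.pairwise_cons.mp hdesc).2 hmem'
        (fun y' hy' hs => hmax y' (List.mem_cons_of_mem _ hy') hs)

-- B's downward loop finds exactly the longest prefix of base that is in the set
theorem pvBLoop_eq (base l : String) (s : PySem.Set String) (k : Nat)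
    (hmem : l ∈ s)
    (hpre : base.toList.take l.toList.length = l.toList)
    (hlen : l.toList.length ≤ k)
    (hmax : ∀ j, l.toList.length < j → j ≤ k → String.ofList (base.toList.take j) ∉ s) :
    pvBLoop base s k = some l := by
  induction k with
  | zero =>
    have h0 : l.toList.length = 0 := Nat.le_zero.mp hlen
    have hls : String.ofList (base.toList.take 0) = l := by
      rw [← h0, hpre]; simp
    simp only [pvBLoop, hls]
    rw [if_pos ((PySem.Set.contains_iff _ _).mpr hmem)]
  | succ k ih =>
    by_cases he : l.toList.length = k + 1
    · have hls : String.ofList (base.toList.take (k+1)) = l := by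
        rw [← he, hpre]; simp
      simp only [pvBLoop, hls]
      rw [if_pos ((PySem.Set.contains_iff _ _).mpr hmem)]
    · have hle : l.toList.length ≤ k := by omega
      have hnot : String.ofList (base.toList.take (k+1)) ∉ s :=
        hmax (k+1) (by omega) (le_refl _)
      simp only [pvBLoop]
      rw [if_neg (by simpa [PySem.Set.contains_iff] using hnot)]
      exact ih hle (fun j h1 h2 => hmax j h1 (by omega))

-- B returns pvClassify at the same l
theorem pvB_eq (dir_name l : String) (known_logics : List String)
    (hmem : l ∈ known_logics) (hl : PySem.Str.startswith (pvBase dir_name) l = true)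
    (hmax : ∀ y ∈ known_logics, PySem.Str.startswith (pvBase dir_name) y = true →
      y.toList.length ≤ l.toList.length)
    (hcls : (PySem.Str.isIn "feature" (pvRest (pvBase dir_name) l)
      || PySem.Str.isIn "combined" (pvRest (pvBase dir_name) l)
      || PySem.Str.isIn "embedding" (pvRest (pvBase dir_name) l)) = true) :
    parse_model_dir_alt dir_name known_logics = pvClassify (pvBase dir_name) l := by
  have hpfx : l.toList <+: (pvBase dir_name).toList := by
    have := hl; simp [PySem.Str.startswith] at this
    exact (PySem.Chars.startswith_iff _ _).mp this
  have hpre : (pvBase dir_name).toList.take l.toList.length = l.toList :=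
    (List.prefix_iff_eq_take.mp hpfx).symm
  have hlen : l.toList.length ≤ (pvBase dir_name).toList.length := hpfx.length_le
  have hmax' : ∀ j, l.toList.length < j → j ≤ (pvBase dir_name).toList.length →
      String.ofList ((pvBase dir_name).toList.take j) ∉ PySem.Set.ofList known_logics := by
    intro j h1 h2 hin
    have hinK : String.ofList ((pvBase dir_name).toList.take j) ∈ known_logics :=
      (PySem.Set.mem_ofList _ _).mp hin
    have hsw : PySem.Str.startswith (pvBase dir_name) (String.ofList ((pvBase dir_name).toList.take j)) = true := by
      simp [PySem.Str.startswith]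
      exact (PySem.Chars.startswith_iff _ _).mpr (by simpa using List.take_prefix j (pvBase dir_name).toList)
    have := hmax _ hinK hsw
    rw [show (String.ofList ((pvBase dir_name).toList.take j)).toList = (pvBase dir_name).toList.take j by simp, List.length_take] at this
    omega
  have hB : pvBLoop (pvBase dir_name) (PySem.Set.ofList known_logics) (pvBase dir_name).toList.length = some l :=
    pvBLoop_eq _ _ _ _ ((PySem.Set.mem_ofList _ _).mpr hmem) hpre hlen hmax'
  simp only [parse_model_dir_alt, hB]
  exact pv_chain _ _ _ l hcls

-- ===== VERDICT (by name: the statement is the Claim_ definition above) =====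
theorem parse_model_dir_spec : Claim_equal_parse_model_dir := by
  intro dir_name known_logics _ hpre
  obtain ⟨l, hmem, hl, hmax, hcls⟩ := hpre
  unfold Spec_parse_model_dir
  have hB := pvB_eq dir_name l known_logics hmem hl hmax hcls
  have hA : parse_model_dir dir_name known_logics = pvClassify (pvBase dir_name) l := by
    unfold parse_model_dir
    apply pvALoop_eq
    · exact PySem.List.sorted_pairwise_rev known_logics (fun s => s.toList.length)
    · exact (PySem.List.mem_sorted _ _ _ _).mpr hmem
    · exact hl
    · intro y hy hs
      exact hmax y ((PySem.List.mem_sorted _ _ _ _).mp hy) hs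
    · exact hcls
  rw [hA, hB]
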